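-- pv_equiv track=rewrite | github.com/es-zenhom/vbs | analysis/utils/analysis.py | get_selection_str
-- ===== SOURCE A (Python) =====
-- def get_selection_str(selection):
--     selection = selection.replace(" ", "_")
--     repl_map = {
--         ">=": "geq", "<=": "leq", ">": "gt", "<": "lt", "==": "eq", "!=": "neq",
--         ".": "p", "-": "m"
--     }
--     for char, repl in repl_map.items():
--         selection = selection.replace(char, repl)
--
--     return selection
-- ===== SOURCE B (Python) =====
-- def get_selection_str(selection):
--     # Single left-to-right scan: two-character operators first, then single chars.
--     two = {">=": "geq", "<=": "leq", "==": "eq", "!=": "neq"}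
--     one = {" ": "_", ">": "gt", "<": "lt", ".": "p", "-": "m"}
--     out = []
--     i, n = 0, len(selection)
--     while i < n:
--         pair = selection[i:i + 2]
--         if pair in two:
--             out.append(two[pair])
--             i += 2
--         else:
--             out.append(one.get(selection[i], selection[i]))
--             i += 1
--     return "".join(out)
-- ===== Notes on version B (the rewrite author's own statement) =====
-- stated objective: alternative
-- what changed: A rewrites the string nine times via cascaded str.replace passes; B builds the result in one left-to-right scan matching two-character operators first. Pre_ excludes strings containing the nonsense token "!==", where A's accidental replace order ("==" before "!=") gives '!eq' while the scan gives 'neq=' and neither value is specified.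
-- outside the precondition, e.g. on get_selection_str('!=='): A returns '!eq', B returns 'neq='; on get_selection_str('a!==b'): A returns 'a!eqb', B returns 'aneq=b'
import Mathlib
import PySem

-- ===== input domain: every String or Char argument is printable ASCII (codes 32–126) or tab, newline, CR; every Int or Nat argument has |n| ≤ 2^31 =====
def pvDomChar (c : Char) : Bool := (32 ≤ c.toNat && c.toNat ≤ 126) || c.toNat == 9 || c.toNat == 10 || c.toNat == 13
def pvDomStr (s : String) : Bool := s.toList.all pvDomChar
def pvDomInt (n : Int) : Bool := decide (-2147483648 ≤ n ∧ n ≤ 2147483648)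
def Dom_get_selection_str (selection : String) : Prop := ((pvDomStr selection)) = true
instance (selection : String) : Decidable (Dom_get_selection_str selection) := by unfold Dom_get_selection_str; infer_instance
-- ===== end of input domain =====

-- B replaces A's nine sequential str.replace passes by a single left-to-right scan
-- (objective: alternative single-pass algorithm); same return value on Pre_, no mutation.

-- ===== PORT A =====

def get_selection_str (selection : String) : String :=
  let selection := PySem.Str.replace selection " " "_"
  let repl_map : PySem.Dict String String := PySem.Dict.ofList
    [(">=", "geq"), ("<=", "leq"), (">", "gt"), ("<", "lt"), ("==", "eq"), ("!=", "neq"),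
     (".", "p"), ("-", "m")]
  repl_map.items.foldl (fun s cr => PySem.Str.replace s cr.1 cr.2) selection


-- ===== PORT B =====
-- one.get(c, c) of Source B (the single-character replacements)

def pvMapOne (c : Char) : List Char :=
  if c = ' ' then ['_']
  else if c = '>' then ['g', 't']
  else if c = '<' then ['l', 't']
  else if c = '.' then ['p']
  else if c = '-' then ['m']
  else [c]

-- the while loop of Source B: the two-character window is tried first, else one character

def pvScanB : List Char → List Char
  | [] => []
  | '>' :: '=' :: t => 'g' :: 'e' :: 'q' :: pvScanB t
  | '<' :: '=' :: t => 'l' :: 'e' :: 'q' :: pvScanB t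
  | '=' :: '=' :: t => 'e' :: 'q' :: pvScanB t
  | '!' :: '=' :: t => 'n' :: 'e' :: 'q' :: pvScanB t
  | c :: t => pvMapOne c ++ pvScanB t
termination_by l => l.length

def get_selection_str_alt (selection : String) : String :=
  String.ofList (pvScanB selection.toList)


-- ===== PRECONDITION & SPEC =====
-- Pre_ excludes strings containing the nonsense token "!==", where A's cascaded replace
-- order ("==" before "!=") yields '!eq' while the single scan yields 'neq='; neither
-- value is specified for that token.
def Pre_get_selection_str (selection : String) : Prop :=
  ¬ (['!', '=', '='] <:+: selection.toList)
instance (selection : String) : Decidable (Pre_get_selection_str selection) := by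
  unfold Pre_get_selection_str; infer_instance

def pvWitness_get_selection_str : String := "pt > 30 and m.x != 2.5"

def Spec_get_selection_str (selection : String) (out : String) : Prop := out = get_selection_str_alt selection
instance (selection : String) (out : String) : Decidable (Spec_get_selection_str selection out) := by unfold Spec_get_selection_str; infer_instance

-- ===== CLAIM (what is proved, stated in full; the proofs are below) =====
def Claim_equal_get_selection_str : Prop := ∀ (selection : String), Dom_get_selection_str selection → Pre_get_selection_str selection → Spec_get_selection_str selection (get_selection_str selection)

-- ===== LEMMAS AND PROOFS =====

-- Python's str.replace with a nonempty pattern, as a plain well-founded recursion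

def pvRep (old new : List Char) : List Char → List Char
  | [] => []
  | c :: t =>
    if h : old.isPrefixOf (c :: t) ∧ old ≠ [] then
      new ++ pvRep old new (List.drop old.length (c :: t))
    else c :: pvRep old new t
termination_by l => l.length
decreasing_by
  · have : 1 ≤ old.length := by
      cases old with
      | nil => exact absurd rfl h.2
      | cons a b => simp
    simp [List.length_drop]; omega
  · simp

theorem pvGo_eq (old new : List Char) (hold : old ≠ []) :
    ∀ (fuel : Nat) (l acc : List Char), l.length ≤ fuel →
      PySem.Chars.replace.go old new fuel l acc = acc.reverse ++ pvRep old new l := by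
  intro fuel
  induction fuel with
  | zero =>
    intro l acc hl
    have : l = [] := by cases l <;> simp_all
    subst this
    simp [PySem.Chars.replace.go, pvRep]
  | succ n ih =>
    intro l acc hl
    cases l with
    | nil => simp [PySem.Chars.replace.go, pvRep]
    | cons c t =>
      rw [PySem.Chars.replace.go]
      by_cases hp : old.isPrefixOf (c :: t)
      · have h1 : 1 ≤ old.length := by cases old with
          | nil => exact absurd rfl hold
          | cons a b => simp
        rw [if_pos hp, ih _ _ (by simp at hl ⊢; omega)]
        rw [pvRep, dif_pos ⟨hp, hold⟩]
        simp
      · rw [if_neg hp, ih _ _ (by simp at hl ⊢; omega)]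
        rw [pvRep, dif_neg (by tauto)]
        simp

theorem pvReplace_eq (o : Char) (os new s : List Char) :
    PySem.Chars.replace s (o :: os) new = pvRep (o :: os) new s := by
  rw [PySem.Chars.replace]
  simp only [List.isEmpty_cons, if_false, Bool.false_eq_true]
  exact pvGo_eq _ _ (by simp) _ _ _ le_rfl

theorem pvRep_nil (old new : List Char) : pvRep old new [] = [] := by rw [pvRep]

theorem pvRep1_ne {c p : Char} (r t) (h : c ≠ p) :
    pvRep [p] r (c :: t) = c :: pvRep [p] r t := by
  rw [pvRep, dif_neg]; simp [List.isPrefixOf, Ne.symm h]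

theorem pvRep1_eq (p : Char) (r t) : pvRep [p] r (p :: t) = r ++ pvRep [p] r t := by
  rw [pvRep, dif_pos] <;> simp [List.isPrefixOf]

theorem pvRep2_cons_ne {c p : Char} (q r t) (h : c ≠ p) :
    pvRep [p, q] r (c :: t) = c :: pvRep [p, q] r t := by
  rw [pvRep, dif_neg]; simp [List.isPrefixOf, Ne.symm h]

theorem pvRep2_cons2_ne {d q : Char} (c p r t) (h : d ≠ q) :
    pvRep [p, q] r (c :: d :: t) = c :: pvRep [p, q] r (d :: t) := by
  rw [pvRep, dif_neg]; simp [List.isPrefixOf, Ne.symm h]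

theorem pvRep2_single (p q : Char) (r c) : pvRep [p, q] r [c] = [c] := by
  rw [pvRep, dif_neg] <;> simp [List.isPrefixOf, pvRep_nil]

theorem pvRep2_match (p q : Char) (r t) :
    pvRep [p, q] r (p :: q :: t) = r ++ pvRep [p, q] r t := by
  rw [pvRep, dif_pos] <;> simp [List.isPrefixOf]

theorem pvScanB_nil : pvScanB [] = [] := by rw [pvScanB]

theorem pvScanB_space (t) : pvScanB (' ' :: t) = '_' :: pvScanB t := by
  rw [pvScanB.eq_def]; split
  all_goals try (rename_i heq; obtain ⟨rfl, rfl⟩ := heq)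
  all_goals simp_all [pvMapOne]

theorem pvScanB_geq (t) : pvScanB ('>' :: '=' :: t) = 'g' :: 'e' :: 'q' :: pvScanB t := by rw [pvScanB]

theorem pvScanB_leq (t) : pvScanB ('<' :: '=' :: t) = 'l' :: 'e' :: 'q' :: pvScanB t := by rw [pvScanB]

theorem pvScanB_eqeq (t) : pvScanB ('=' :: '=' :: t) = 'e' :: 'q' :: pvScanB t := by rw [pvScanB]

theorem pvScanB_neq (t) : pvScanB ('!' :: '=' :: t) = 'n' :: 'e' :: 'q' :: pvScanB t := by rw [pvScanB]

theorem pvScanB_gt (d : Char) (t) (h : d ≠ '=') :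
    pvScanB ('>' :: d :: t) = 'g' :: 't' :: pvScanB (d :: t) := by
  rw [pvScanB.eq_def]; split
  all_goals try (rename_i heq; obtain ⟨rfl, rfl⟩ := heq)
  all_goals simp_all [pvMapOne]

theorem pvScanB_lt' (d : Char) (t) (h : d ≠ '=') :
    pvScanB ('<' :: d :: t) = 'l' :: 't' :: pvScanB (d :: t) := by
  rw [pvScanB.eq_def]; split
  all_goals try (rename_i heq; obtain ⟨rfl, rfl⟩ := heq)
  all_goals simp_all [pvMapOne]

theorem pvScanB_eq1 (d : Char) (t) (h : d ≠ '=') :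
    pvScanB ('=' :: d :: t) = '=' :: pvScanB (d :: t) := by
  rw [pvScanB.eq_def]; split
  all_goals try (rename_i heq; obtain ⟨rfl, rfl⟩ := heq)
  all_goals simp_all [pvMapOne]

theorem pvScanB_bang1 (d : Char) (t) (h : d ≠ '=') :
    pvScanB ('!' :: d :: t) = '!' :: pvScanB (d :: t) := by
  rw [pvScanB.eq_def]; split
  all_goals try (rename_i heq; obtain ⟨rfl, rfl⟩ := heq)
  all_goals simp_all [pvMapOne]

theorem pvScanB_dot (t) : pvScanB ('.' :: t) = 'p' :: pvScanB t := by
  rw [pvScanB.eq_def]; split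
  all_goals try (rename_i heq; obtain ⟨rfl, rfl⟩ := heq)
  all_goals simp_all [pvMapOne]

theorem pvScanB_dash (t) : pvScanB ('-' :: t) = 'm' :: pvScanB t := by
  rw [pvScanB.eq_def]; split
  all_goals try (rename_i heq; obtain ⟨rfl, rfl⟩ := heq)
  all_goals simp_all [pvMapOne]

theorem pvScanB_single (c : Char) : pvScanB [c] = pvMapOne c := by
  rw [pvScanB.eq_def]; split
  all_goals try (rename_i heq; obtain ⟨rfl, rfl⟩ := heq)
  all_goals simp_all [pvMapOne, pvScanB_nil]

theorem pvScanB_other (c : Char) (t) (h : c ∉ [' ', '>', '<', '=', '!', '.', '-']) :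
    pvScanB (c :: t) = c :: pvScanB t := by
  rw [pvScanB.eq_def]; split
  all_goals try (rename_i heq; obtain ⟨rfl, rfl⟩ := heq)
  all_goals simp_all [pvMapOne]

-- A's nine replace passes, composed (on the char-list side)

def pvChain (l : List Char) : List Char :=
  pvRep ['-'] ['m'] (pvRep ['.'] ['p'] (pvRep ['!','='] ['n','e','q']
    (pvRep ['=','='] ['e','q'] (pvRep ['<'] ['l','t'] (pvRep ['>'] ['g','t']
    (pvRep ['<','='] ['l','e','q'] (pvRep ['>','='] ['g','e','q']
    (pvRep [' '] ['_'] l))))))))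

-- the "no !==" hypothesis propagates to tails

theorem pvNoB_tail {c : Char} {t : List Char} (h : ¬ (['!','=','='] <:+: c :: t)) :
    ¬ (['!','=','='] <:+: t) :=
  fun h' => h (h'.trans (List.suffix_cons c t).isInfix)

-- every pass emits a nonempty string whose head is not '=' on such input (used for lookahead)

theorem pvRep_head_ne (old new : List Char) (hn : new ≠ []) (hnew : new.head? ≠ some '=')
    (l : List Char) (hl : l ≠ []) (h : l.head? ≠ some '=') :
    pvRep old new l ≠ [] ∧ (pvRep old new l).head? ≠ some '=' := by
  cases l with
  | nil => exact absurd rfl hl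
  | cons c t =>
    rw [pvRep]
    split
    · cases new with
      | nil => exact absurd rfl hn
      | cons n ns => simpa using hnew
    · simpa using h

theorem pvHead4 (d : Char) (X : List Char) (hd : d ≠ '=') :
    ∃ e Y, pvRep ['<'] ['l','t'] (pvRep ['>'] ['g','t'] (pvRep ['<','='] ['l','e','q']
      (pvRep ['>','='] ['g','e','q'] (d :: X)))) = e :: Y ∧ e ≠ '=' := by
  have h0 : (d :: X) ≠ [] ∧ (d :: X).head? ≠ some '=' := ⟨by simp, by simpa using hd⟩
  have h1 := pvRep_head_ne ['>','='] ['g','e','q'] (by simp) (by simp) _ h0.1 h0.2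
  have h2 := pvRep_head_ne ['<','='] ['l','e','q'] (by simp) (by simp) _ h1.1 h1.2
  have h3 := pvRep_head_ne ['>'] ['g','t'] (by simp) (by simp) _ h2.1 h2.2
  have h4 := pvRep_head_ne ['<'] ['l','t'] (by simp) (by simp) _ h3.1 h3.2
  rcases hs : pvRep ['<'] ['l','t'] (pvRep ['>'] ['g','t'] (pvRep ['<','='] ['l','e','q']
      (pvRep ['>','='] ['g','e','q'] (d :: X)))) with _ | ⟨e, Y⟩
  · exact absurd hs h4.1
  · refine ⟨e, Y, rfl, ?_⟩
    rw [hs] at h4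
    simpa using h4.2

-- the composed passes compute exactly what the single scan computes, absent "!=="

theorem pvMain (l : List Char) (hb : ¬ (['!','=','='] <:+: l)) : pvChain l = pvScanB l := by
  induction l using pvScanB.induct with
  | case1 => simp [pvChain, pvRep_nil, pvScanB_nil]
  | case2 t ih =>
    have ih := ih (pvNoB_tail (pvNoB_tail hb))
    simp [pvChain, pvRep_nil, pvRep1_ne, pvRep1_eq, pvRep2_cons_ne, pvRep2_cons2_ne, pvRep2_single, pvRep2_match] at ih ⊢
    rw [pvScanB_geq, ← ih]
  | case3 t ih =>
    have ih := ih (pvNoB_tail (pvNoB_tail hb))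
    simp [pvChain, pvRep_nil, pvRep1_ne, pvRep1_eq, pvRep2_cons_ne, pvRep2_cons2_ne, pvRep2_single, pvRep2_match] at ih ⊢
    rw [pvScanB_leq, ← ih]
  | case4 t ih =>
    have ih := ih (pvNoB_tail (pvNoB_tail hb))
    simp [pvChain, pvRep_nil, pvRep1_ne, pvRep1_eq, pvRep2_cons_ne, pvRep2_cons2_ne, pvRep2_single, pvRep2_match] at ih ⊢
    rw [pvScanB_eqeq, ← ih]
  | case5 t ih =>
    have ih := ih (pvNoB_tail (pvNoB_tail hb))
    rcases t with _ | ⟨d, t2⟩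
    · simp [pvChain, pvRep_nil, pvRep1_ne, pvRep1_eq, pvRep2_cons_ne, pvRep2_cons2_ne, pvRep2_single, pvRep2_match, pvScanB]
    · have hd : d ≠ '=' := by
        intro h'; subst h'
        exact hb ⟨[], t2, by simp⟩
      by_cases hsp : d = ' '
      · subst hsp
        simp [pvChain, pvRep_nil, pvRep1_ne, pvRep1_eq, pvRep2_cons_ne, pvRep2_cons2_ne, pvRep2_single, pvRep2_match] at ih ⊢
        rw [pvScanB_neq, ← ih]
      · obtain ⟨e, Y, hZ, he⟩ := pvHead4 d (pvRep [' '] ['_'] t2) hd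
        simp [pvChain, pvRep1_ne _ _ hsp, pvRep_nil, pvRep1_ne, pvRep1_eq, pvRep2_cons_ne, pvRep2_cons2_ne, pvRep2_single, pvRep2_match] at ih ⊢
        rw [hZ] at ih ⊢
        simp [pvRep2_cons2_ne _ _ _ _ he, pvRep2_cons_ne _ _ _ he, pvRep_nil, pvRep1_ne, pvRep1_eq, pvRep2_cons_ne, pvRep2_cons2_ne, pvRep2_single, pvRep2_match] at ih ⊢
        rw [pvScanB_neq, ← ih]
  | case6 c t h1 h2 h3 h4 ih =>
    have ih := ih (pvNoB_tail hb)
    by_cases hc1 : c = ' '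
    · subst hc1
      simp [pvChain, pvRep_nil, pvRep1_ne, pvRep1_eq, pvRep2_cons_ne, pvRep2_cons2_ne, pvRep2_single, pvRep2_match] at ih ⊢
      rw [pvScanB_space, ← ih]
    · by_cases hc2 : c = '>'
      · subst hc2
        rcases t with _ | ⟨d, t2⟩
        · simp [pvChain, pvRep_nil, pvRep1_ne, pvRep1_eq, pvRep2_cons_ne, pvRep2_cons2_ne, pvRep2_single, pvRep2_match, pvScanB_single, pvMapOne]
        · have hd : d ≠ '=' := fun h' => h1 t2 rfl (by rw [h'])
          by_cases hsp : d = ' '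
          · subst hsp
            simp [pvChain, pvRep_nil, pvRep1_ne, pvRep1_eq, pvRep2_cons_ne, pvRep2_cons2_ne, pvRep2_single, pvRep2_match] at ih ⊢
            rw [pvScanB_gt _ _ (by decide), ← ih]
          · simp [pvChain, pvRep1_ne _ _ hsp, pvRep2_cons2_ne _ _ _ _ hd, pvRep_nil, pvRep1_ne, pvRep1_eq, pvRep2_cons_ne, pvRep2_cons2_ne, pvRep2_single, pvRep2_match] at ih ⊢
            rw [pvScanB_gt _ _ hd, ← ih]
      · by_cases hc3 : c = '<'
        · subst hc3
          rcases t with _ | ⟨d, t2⟩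
          · simp [pvChain, pvRep_nil, pvRep1_ne, pvRep1_eq, pvRep2_cons_ne, pvRep2_cons2_ne, pvRep2_single, pvRep2_match, pvScanB_single, pvMapOne]
          · have hd : d ≠ '=' := fun h' => h2 t2 rfl (by rw [h'])
            by_cases hsp : d = ' '
            · subst hsp
              simp [pvChain, pvRep_nil, pvRep1_ne, pvRep1_eq, pvRep2_cons_ne, pvRep2_cons2_ne, pvRep2_single, pvRep2_match] at ih ⊢
              rw [pvScanB_lt' _ _ (by decide), ← ih]
            · have hh := pvRep_head_ne ['>','='] ['g','e','q'] (by simp) (by simp)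
                (d :: pvRep [' '] ['_'] t2) (by simp) (by simpa using hd)
              rcases hs : pvRep ['>','='] ['g','e','q'] (d :: pvRep [' '] ['_'] t2) with _ | ⟨e, Y⟩
              · exact absurd hs hh.1
              · have he : e ≠ '=' := by rw [hs] at hh; simpa using hh.2
                simp [pvChain, pvRep1_ne _ _ hsp, pvRep_nil, pvRep1_ne, pvRep1_eq, pvRep2_cons_ne, pvRep2_cons2_ne, pvRep2_single, pvRep2_match] at ih ⊢
                rw [hs] at ih ⊢
                simp [pvRep2_cons2_ne _ _ _ _ he, pvRep2_cons_ne _ _ _ he, pvRep_nil, pvRep1_ne, pvRep1_eq, pvRep2_cons_ne, pvRep2_cons2_ne, pvRep2_single, pvRep2_match] at ih ⊢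
                rw [pvScanB_lt' _ _ hd, ← ih]
        · by_cases hc4 : c = '='
          · subst hc4
            rcases t with _ | ⟨d, t2⟩
            · simp [pvChain, pvRep_nil, pvRep1_ne, pvRep1_eq, pvRep2_cons_ne, pvRep2_cons2_ne, pvRep2_single, pvRep2_match, pvScanB_single, pvMapOne]
            · have hd : d ≠ '=' := fun h' => h3 t2 rfl (by rw [h'])
              by_cases hsp : d = ' '
              · subst hsp
                simp [pvChain, pvRep_nil, pvRep1_ne, pvRep1_eq, pvRep2_cons_ne, pvRep2_cons2_ne, pvRep2_single, pvRep2_match] at ih ⊢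
                rw [pvScanB_eq1 _ _ (by decide), ← ih]
              · obtain ⟨e, Y, hZ, he⟩ := pvHead4 d (pvRep [' '] ['_'] t2) hd
                simp [pvChain, pvRep1_ne _ _ hsp, pvRep_nil, pvRep1_ne, pvRep1_eq, pvRep2_cons_ne, pvRep2_cons2_ne, pvRep2_single, pvRep2_match] at ih ⊢
                rw [hZ] at ih ⊢
                simp [pvRep2_cons2_ne _ _ _ _ he, pvRep2_cons_ne _ _ _ he, pvRep_nil, pvRep1_ne, pvRep1_eq, pvRep2_cons_ne, pvRep2_cons2_ne, pvRep2_single, pvRep2_match] at ih ⊢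
                rw [pvScanB_eq1 _ _ hd, ← ih]
          · by_cases hc5 : c = '!'
            · subst hc5
              rcases t with _ | ⟨d, t2⟩
              · simp [pvChain, pvRep_nil, pvRep1_ne, pvRep1_eq, pvRep2_cons_ne, pvRep2_cons2_ne, pvRep2_single, pvRep2_match, pvScanB_single, pvMapOne]
              · have hd : d ≠ '=' := fun h' => h4 t2 rfl (by rw [h'])
                by_cases hsp : d = ' '
                · subst hsp
                  simp [pvChain, pvRep_nil, pvRep1_ne, pvRep1_eq, pvRep2_cons_ne, pvRep2_cons2_ne, pvRep2_single, pvRep2_match] at ih ⊢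
                  rw [pvScanB_bang1 _ _ (by decide), ← ih]
                · obtain ⟨e, Y, hZ, he⟩ := pvHead4 d (pvRep [' '] ['_'] t2) hd
                  simp [pvChain, pvRep1_ne _ _ hsp, pvRep_nil, pvRep1_ne, pvRep1_eq, pvRep2_cons_ne, pvRep2_cons2_ne, pvRep2_single, pvRep2_match] at ih ⊢
                  rw [hZ] at ih ⊢
                  simp [pvRep2_cons2_ne _ _ _ _ he, pvRep2_cons_ne _ _ _ he, pvRep_nil, pvRep1_ne, pvRep1_eq, pvRep2_cons_ne, pvRep2_cons2_ne, pvRep2_single, pvRep2_match] at ih ⊢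
                  rw [pvScanB_bang1 _ _ hd, ← ih]
            · by_cases hc6 : c = '.'
              · subst hc6
                simp [pvChain, pvRep_nil, pvRep1_ne, pvRep1_eq, pvRep2_cons_ne, pvRep2_cons2_ne, pvRep2_single, pvRep2_match] at ih ⊢
                rw [pvScanB_dot, ← ih]
              · by_cases hc7 : c = '-'
                · subst hc7
                  simp [pvChain, pvRep_nil, pvRep1_ne, pvRep1_eq, pvRep2_cons_ne, pvRep2_cons2_ne, pvRep2_single, pvRep2_match] at ih ⊢
                  rw [pvScanB_dash, ← ih]
                · simp [pvChain, pvRep1_ne _ _ hc1, pvRep1_ne _ _ hc2, pvRep1_ne _ _ hc3,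
                    pvRep2_cons_ne _ _ _ hc2, pvRep2_cons_ne _ _ _ hc3, pvRep2_cons_ne _ _ _ hc4,
                    pvRep2_cons_ne _ _ _ hc5, pvRep1_ne _ _ hc6, pvRep1_ne _ _ hc7, pvRep_nil, pvRep1_ne, pvRep1_eq, pvRep2_cons_ne, pvRep2_cons2_ne, pvRep2_single, pvRep2_match] at ih ⊢
                  rw [pvScanB_other _ _ (by simp [hc1, hc2, hc3, hc4, hc5, hc6, hc7]), ← ih]

-- ===== VERDICT (by name: the statement is the Claim_ definition above) =====
theorem get_selection_str_spec : Claim_equal_get_selection_str := by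
  intro s _ hpre
  unfold Spec_get_selection_str
  unfold get_selection_str get_selection_str_alt
  dsimp only
  rw [show (PySem.Dict.ofList [((">=":String), ("geq":String)), ("<=", "leq"), (">", "gt"),
      ("<", "lt"), ("==", "eq"), ("!=", "neq"), (".", "p"), ("-", "m")]).items
    = [((">=":String), ("geq":String)), ("<=", "leq"), (">", "gt"), ("<", "lt"), ("==", "eq"),
      ("!=", "neq"), (".", "p"), ("-", "m")] from by decide]
  simp only [List.foldl, PySem.Str.replace]
  simp only [String.toList_ofList]
  rw [← pvMain _ hpre]
  simp [pvChain, pvReplace_eq]
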